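-- pv_equiv track=rewrite | github.com/provide-io/wrknv | mutants/src/wrknv/wenv/operations/verify.py | x_parse_tofu_version__mutmut_25
-- ===== SOURCE A (Python) =====
-- def x_parse_tofu_version__mutmut_25(output: str) -> dict[str, str]:
--     """Parse OpenTofu version output."""
--
--     # Example: "OpenTofu v1.6.0"
--     lines = output.split("\n")
--
--     info = {"tool": "tofu"}
--
--     for line in lines:
--         line = line.strip()
--         if line.startswith("OpenTofu v"):
--             version = line.replace("OpenTofu v", "")
--             info["VERSION"] = version
--         elif line.startswith("on "):
--             # Extract platform from "on darwin_arm64" format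
--             info["platform"] = line.replace("on ", "").strip()
--
--     return info
-- ===== SOURCE B (Python) =====
-- def x_parse_tofu_version__mutmut_25(output: str) -> dict[str, str]:
--     """Parse OpenTofu version output."""
--     lines = [line.strip() for line in output.split("\n")]
--     versions = [l for l in lines if l.startswith("OpenTofu v")]
--     platforms = [l for l in lines if l.startswith("on ")]
--     info = {"tool": "tofu"}
--     if versions:
--         info["VERSION"] = versions[-1].replace("OpenTofu v", "")
--     if platforms:
--         info["platform"] = platforms[-1].replace("on ", "").strip()
--     return info
-- ===== Notes on version B (the rewrite author's own statement) =====
-- stated objective: simpler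
-- what changed: A folds a dict over every line with branch-and-overwrite; B filters the matching lines per field once and takes the last match, inserting in a fixed key order. Pre_ excludes inputs where a platform line precedes every version line while both occur: there A's dict key order (platform before VERSION) is an accident of line order, and either order is defensible for a dict result.
import Mathlib
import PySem

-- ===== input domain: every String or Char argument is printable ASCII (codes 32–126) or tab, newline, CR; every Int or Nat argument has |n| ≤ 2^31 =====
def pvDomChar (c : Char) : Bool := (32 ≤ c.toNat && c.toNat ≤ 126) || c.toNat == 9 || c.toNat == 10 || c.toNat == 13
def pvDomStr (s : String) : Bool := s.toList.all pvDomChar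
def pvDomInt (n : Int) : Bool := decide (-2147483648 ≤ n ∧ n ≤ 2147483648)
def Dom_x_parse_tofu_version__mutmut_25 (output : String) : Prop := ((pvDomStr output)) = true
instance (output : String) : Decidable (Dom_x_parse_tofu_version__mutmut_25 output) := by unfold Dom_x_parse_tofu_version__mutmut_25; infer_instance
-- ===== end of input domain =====

-- B replaces A's dict-folding line loop by filter-per-field + last match, with a fixed key order;
-- simpler decomposition, equal output on Pre_ (which only excludes an accidental key-order corner).

-- ===== PORT A =====
-- literal transliteration of A: fold a dict over the split lines, overwriting keys
def x_parse_tofu_version__mutmut_25 (output : String) : List (String × String) :=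
  let lines := (PySem.Str.split? output "\n").getD []   -- sep "\n" ≠ "", so split? is always some
  let info : PySem.Dict String String := PySem.Dict.ofList [("tool", "tofu")]
  (lines.foldl (fun info line =>
    let line := PySem.Str.strip line
    if PySem.Str.startswith line "OpenTofu v" then
      info.insert "VERSION" (PySem.Str.replace line "OpenTofu v" "")
    else if PySem.Str.startswith line "on " then
      info.insert "platform" (PySem.Str.strip (PySem.Str.replace line "on " ""))
    else info) info).items

-- ===== PORT B =====
-- transliteration of Source B: strip all lines, filter each field's matching lines, last match wins
def x_parse_tofu_version__mutmut_25_alt (output : String) : List (String × String) :=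
  let lines := ((PySem.Str.split? output "\n").getD []).map PySem.Str.strip
  let versions := lines.filter (fun l => PySem.Str.startswith l "OpenTofu v")
  let platforms := lines.filter (fun l => PySem.Str.startswith l "on ")
  let info : PySem.Dict String String := PySem.Dict.ofList [("tool", "tofu")]
  let info := match versions.getLast? with          -- 'if versions: ... versions[-1] ...'
    | some v => info.insert "VERSION" (PySem.Str.replace v "OpenTofu v" "")
    | none => info
  let info := match platforms.getLast? with         -- 'if platforms: ... platforms[-1] ...'
    | some p => info.insert "platform" (PySem.Str.strip (PySem.Str.replace p "on " ""))
    | none => info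
  info.items

-- ===== PRECONDITION & SPEC =====
-- the two line predicates (used by Pre_ and by the proofs)
def pvV (l : String) : Bool := PySem.Str.startswith l "OpenTofu v"
def pvP (l : String) : Bool := PySem.Str.startswith l "on "

-- Pre_ excludes inputs where a platform line precedes every version line while both occur:
-- there A's dict key order (platform before VERSION) is an accident of line order, and either
-- order is defensible for a dict result (the values of the two dicts agree everywhere).
def Pre_x_parse_tofu_version__mutmut_25 (output : String) : Prop :=
  (let ls := ((PySem.Str.split? output "\n").getD []).map PySem.Str.strip
   match ls.findIdx? pvV, ls.findIdx? pvP with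
   | some i, some j => decide (i < j)
   | _, _ => true) = true
instance (output : String) : Decidable (Pre_x_parse_tofu_version__mutmut_25 output) := by unfold Pre_x_parse_tofu_version__mutmut_25; infer_instance

def pvWitness_x_parse_tofu_version__mutmut_25 : String := "OpenTofu v1.6.0\non darwin_arm64"

def Spec_x_parse_tofu_version__mutmut_25 (output : String) (out : List (String × String)) : Prop := out = x_parse_tofu_version__mutmut_25_alt output
instance (output : String) (out : List (String × String)) : Decidable (Spec_x_parse_tofu_version__mutmut_25 output out) := by unfold Spec_x_parse_tofu_version__mutmut_25; infer_instance

-- ===== CLAIM (what is proved, stated in full; the proofs are below) =====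
def Claim_equal_x_parse_tofu_version__mutmut_25 : Prop := ∀ (output : String), Dom_x_parse_tofu_version__mutmut_25 output → Pre_x_parse_tofu_version__mutmut_25 output → Spec_x_parse_tofu_version__mutmut_25 output (x_parse_tofu_version__mutmut_25 output)

-- ===== LEMMAS AND PROOFS =====

-- the value extractors, shared by the proofs
def pvFV (l : String) : String := PySem.Str.replace l "OpenTofu v" ""
def pvFP (l : String) : String := PySem.Str.strip (PySem.Str.replace l "on " "")
def pvVer (ls : List String) : String := ((ls.reverse.find? pvV).map pvFV).getD ""
def pvPlat (ls : List String) : String := ((ls.reverse.find? pvP).map pvFP).getD ""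
def pvStep (d : PySem.Dict String String) (line : String) : PySem.Dict String String :=
  if pvV line then d.insert "VERSION" (pvFV line)
  else if pvP line then d.insert "platform" (pvFP line)
  else d
-- closed form of A's fold: value = last match, key position = first match
def pvShape (ls : List String) (d : PySem.Dict String String) : PySem.Dict String String :=
  match ls.findIdx? pvV, ls.findIdx? pvP with
  | none, none => d
  | some _, none => d.insert "VERSION" (pvVer ls)
  | none, some _ => d.insert "platform" (pvPlat ls)
  | some i, some j =>
      if i < j then (d.insert "VERSION" (pvVer ls)).insert "platform" (pvPlat ls)
      else (d.insert "platform" (pvPlat ls)).insert "VERSION" (pvVer ls)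

-- a line cannot start with both "OpenTofu v" and "on " (first characters differ)
lemma pvExcl (l : String) (h : pvV l = true) : pvP l = false := by
  unfold pvV pvP PySem.Str.startswith PySem.Chars.startswith at *
  cases hc : l.toList with
  | nil => rw [hc] at h; simp at h
  | cons c cs =>
    rw [hc] at h
    rw [show ("OpenTofu v").toList = 'O'::"penTofu v".toList from rfl] at h
    rw [show ("on ").toList = 'o'::"n ".toList from rfl]
    simp only [List.isPrefixOf_iff_prefix, List.cons_prefix_cons] at h
    simp only [Bool.eq_false_iff, ne_eq, List.isPrefixOf_iff_prefix, List.cons_prefix_cons]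
    rintro ⟨rfl, -⟩
    exact absurd h.1 (by decide)

lemma pvDictExt {d e : PySem.Dict String String} (h : d.items = e.items) : d = e := by
  cases d; cases e; simpa using h

lemma pvKeysNe (d : PySem.Dict String String) (k : String) (h : d.contains k = false) :
    ∀ p ∈ d.items, (p.1 == k) = false := by
  intro p hp
  by_contra hb
  rw [Bool.not_eq_false] at hb
  have : d.contains k = true := by
    unfold PySem.Dict.contains
    exact List.any_eq_true.mpr ⟨p, hp, hb⟩
  simp [this] at h

-- inserts at distinct keys: the last value wins, each key keeps its first position
lemma pvIns_comm (d : PySem.Dict String String) (k k' : String) (hne : (k == k') = false)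
    (a b c : String) :
    ((d.insert k a).insert k' b).insert k c = (d.insert k c).insert k' b := by
  have hne' : (k' == k) = false := by simp at hne ⊢; exact fun h => hne h.symm
  have hnep : k ≠ k' := by simpa using hne
  have hnep' : k' ≠ k := by simpa using hne'
  apply pvDictExt
  by_cases hk : d.contains k = true <;> by_cases hk' : d.contains k' = true
  · have c1 : (d.insert k a).contains k' = true := by
      rw [PySem.Dict.contains_insert]; simp [hk']
    have c2 : ((d.insert k a).insert k' b).contains k = true := by
      rw [PySem.Dict.contains_insert, PySem.Dict.contains_insert]; simp [hk]
    have c3 : (d.insert k c).contains k' = true := by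
      rw [PySem.Dict.contains_insert]; simp [hk']
    rw [PySem.Dict.items_insert_of_contains _ _ c2,
        PySem.Dict.items_insert_of_contains _ _ c1,
        PySem.Dict.items_insert_of_contains _ _ hk,
        PySem.Dict.items_insert_of_contains _ _ c3,
        PySem.Dict.items_insert_of_contains _ _ hk]
    simp only [List.map_map]
    apply List.map_congr_left
    intro p _
    by_cases h1 : (p.1 == k) = true <;> by_cases h2 : (p.1 == k') = true <;>
      simp_all [Function.comp]
  · have hk'f : d.contains k' = false := by simpa using hk'
    have c1 : (d.insert k a).contains k' = false := by
      rw [PySem.Dict.contains_insert]; simp [hk'f, hne']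
    have c2 : ((d.insert k a).insert k' b).contains k = true := by
      rw [PySem.Dict.contains_insert, PySem.Dict.contains_insert]; simp [hk]
    have c3 : (d.insert k c).contains k' = false := by
      rw [PySem.Dict.contains_insert]; simp [hk'f, hne']
    rw [PySem.Dict.items_insert_of_contains _ _ c2,
        PySem.Dict.items_insert_of_not_contains _ _ c1,
        PySem.Dict.items_insert_of_contains _ _ hk,
        PySem.Dict.items_insert_of_not_contains _ _ c3,
        PySem.Dict.items_insert_of_contains _ _ hk]
    rw [List.map_append, List.map_map]
    congr 1
    · apply List.map_congr_left
      intro p _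
      by_cases h1 : (p.1 == k) = true <;> simp_all [Function.comp]
    · simp [hnep']
  · have hkf : d.contains k = false := by simpa using hk
    have c1 : (d.insert k a).contains k' = true := by
      rw [PySem.Dict.contains_insert]; simp [hk']
    have c2 : ((d.insert k a).insert k' b).contains k = true := by
      rw [PySem.Dict.contains_insert, PySem.Dict.contains_insert]; simp
    have c3 : (d.insert k c).contains k' = true := by
      rw [PySem.Dict.contains_insert]; simp [hk']
    rw [PySem.Dict.items_insert_of_contains _ _ c2,
        PySem.Dict.items_insert_of_contains _ _ c1,
        PySem.Dict.items_insert_of_not_contains _ _ hkf,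
        PySem.Dict.items_insert_of_contains _ _ c3,
        PySem.Dict.items_insert_of_not_contains _ _ hkf]
    simp only [List.map_append, List.map_map]
    congr 1
    · apply List.map_congr_left
      intro p hp
      have hpk := pvKeysNe d k hkf p hp
      by_cases h2 : (p.1 == k') = true <;> simp_all [Function.comp]
    · simp [hnep]
  · have hkf : d.contains k = false := by simpa using hk
    have hk'f : d.contains k' = false := by simpa using hk'
    have c1 : (d.insert k a).contains k' = false := by
      rw [PySem.Dict.contains_insert]; simp [hk'f, hne']
    have c2 : ((d.insert k a).insert k' b).contains k = true := by
      rw [PySem.Dict.contains_insert, PySem.Dict.contains_insert]; simp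
    have c3 : (d.insert k c).contains k' = false := by
      rw [PySem.Dict.contains_insert]; simp [hk'f, hne']
    rw [PySem.Dict.items_insert_of_contains _ _ c2,
        PySem.Dict.items_insert_of_not_contains _ _ c1,
        PySem.Dict.items_insert_of_not_contains _ _ hkf,
        PySem.Dict.items_insert_of_not_contains _ _ c3,
        PySem.Dict.items_insert_of_not_contains _ _ hkf]
    simp only [List.map_append]
    rw [List.map_congr_left (g := id) (fun p hp => by simp [pvKeysNe d k hkf p hp]), List.map_id]
    simp [hnep']

lemma pvFindIdx_none_iff (p : String → Bool) (ls : List String) :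
    ls.findIdx? p = none ↔ ls.reverse.find? p = none := by
  simp [List.findIdx?_eq_none_iff, List.find?_eq_none]

lemma pvRevFind_some (p : String → Bool) (ls : List String) (i : Nat)
    (h : ls.findIdx? p = some i) : ∃ x, ls.reverse.find? p = some x := by
  rcases hf : ls.reverse.find? p with _ | x
  · rw [← pvFindIdx_none_iff] at hf; simp [h] at hf
  · exact ⟨x, rfl⟩

-- the invariant of A's loop: its fold over any stripped line list is pvShape
lemma pvFold (ls : List String) (d : PySem.Dict String String) :
    ls.foldl pvStep d = pvShape ls d := by
  induction ls generalizing d with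
  | nil => rfl
  | cons l ls ih =>
    rw [List.foldl_cons, ih]
    by_cases hv : pvV l = true
    · have hp : pvP l = false := pvExcl l hv
      have hstep : pvStep d l = d.insert "VERSION" (pvFV l) := by simp [pvStep, hv]
      rw [hstep]
      unfold pvShape
      rcases hV2 : ls.findIdx? pvV with _ | i <;> rcases hP2 : ls.findIdx? pvP with _ | j
      · have hfv : ls.reverse.find? pvV = none := (pvFindIdx_none_iff _ _).mp hV2
        simp [List.findIdx?_cons, hv, hp, hP2, pvVer, List.find?_append, hfv]
      · have hfv : ls.reverse.find? pvV = none := (pvFindIdx_none_iff _ _).mp hV2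
        rcases pvRevFind_some pvP ls j hP2 with ⟨x, hx⟩
        simp [List.findIdx?_cons, hv, hp, hP2, pvVer, pvPlat, List.find?_append, hfv, hx]
      · rcases pvRevFind_some pvV ls i hV2 with ⟨x, hx⟩
        simp [List.findIdx?_cons, hv, hp, hV2, hP2, pvVer, List.find?_append, hx,
          PySem.Dict.insert_insert_self]
      · rcases pvRevFind_some pvV ls i hV2 with ⟨x, hx⟩
        rcases pvRevFind_some pvP ls j hP2 with ⟨y, hy⟩
        simp only [List.findIdx?_cons, hv, hp, if_true, if_false, Bool.false_eq_true,
          hV2, hP2, Option.map_some]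
        simp only [pvVer, pvPlat, List.reverse_cons, List.find?_append, hx, hy, Option.or_some,
          List.find?_cons, hp, hv]
        rw [if_pos (Nat.succ_pos j)]
        split_ifs with hij
        · rw [PySem.Dict.insert_insert_self]; simp
        · rw [pvIns_comm _ _ _ (by decide)]; simp
    · have hv' : pvV l = false := by simpa using hv
      by_cases hpb : pvP l = true
      · have hstep : pvStep d l = d.insert "platform" (pvFP l) := by simp [pvStep, hv', hpb]
        rw [hstep]
        unfold pvShape
        rcases hV2 : ls.findIdx? pvV with _ | i <;> rcases hP2 : ls.findIdx? pvP with _ | j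
        · have hfp : ls.reverse.find? pvP = none := (pvFindIdx_none_iff _ _).mp hP2
          simp [List.findIdx?_cons, hv', hpb, hV2, pvPlat, List.find?_append, hfp]
        · rcases pvRevFind_some pvP ls j hP2 with ⟨y, hy⟩
          simp [List.findIdx?_cons, hv', hpb, hV2, hP2, pvPlat, List.find?_append, hy,
            PySem.Dict.insert_insert_self]
        · rcases pvRevFind_some pvV ls i hV2 with ⟨x, hx⟩
          have hfp : ls.reverse.find? pvP = none := (pvFindIdx_none_iff _ _).mp hP2
          simp [List.findIdx?_cons, hv', hpb, hV2, hP2, pvVer, pvPlat, List.find?_append, hx, hfp]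
        · rcases pvRevFind_some pvV ls i hV2 with ⟨x, hx⟩
          rcases pvRevFind_some pvP ls j hP2 with ⟨y, hy⟩
          simp only [List.findIdx?_cons, hv', hpb, if_true, if_false, Bool.false_eq_true,
            hV2, hP2, Option.map_some]
          simp only [pvVer, pvPlat, List.reverse_cons, List.find?_append, hx, hy, Option.or_some]
          rw [if_neg (by omega : ¬ (i + 1 < 0))]
          split_ifs with hij
          · rw [pvIns_comm _ _ _ (by decide)]; simp
          · rw [PySem.Dict.insert_insert_self]; simp
      · have hp' : pvP l = false := by simpa using hpb
        have hstep : pvStep d l = d := by simp [pvStep, hv', hp']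
        rw [hstep]
        unfold pvShape
        rcases hV2 : ls.findIdx? pvV with _ | i <;> rcases hP2 : ls.findIdx? pvP with _ | j <;>
          simp only [List.findIdx?_cons, hv', hp', if_false, Bool.false_eq_true,
            hV2, hP2, Option.map_some, Option.map_none] <;>
          simp only [pvVer, pvPlat, List.reverse_cons, List.find?_append, List.find?_cons,
            hv', hp', List.find?_nil, Option.or_none]
        rcases pvRevFind_some pvV ls i hV2 with ⟨x, hx⟩
        rcases pvRevFind_some pvP ls j hP2 with ⟨y, hy⟩
        simp only [hx, hy, Option.or_some]
        by_cases hij : i < j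
        · rw [if_pos (by omega : i + 1 < j + 1), if_pos hij]
        · rw [if_neg (by omega : ¬ i + 1 < j + 1), if_neg hij]

-- the last element of the filtered list is the first match from the right
lemma pvLast_filter (p : String → Bool) (ls : List String) :
    (ls.filter p).getLast? = ls.reverse.find? p := by
  rw [← List.head?_reverse, ← List.filter_reverse]
  induction ls.reverse with
  | nil => rfl
  | cons x xs ih =>
    by_cases hx : p x = true
    · simp [List.filter_cons, hx]
    · simp only [Bool.not_eq_true] at hx
      simp [List.filter_cons, hx, ih]

-- ===== VERDICT (by name: the statement is the Claim_ definition above) =====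
theorem x_parse_tofu_version__mutmut_25_spec : Claim_equal_x_parse_tofu_version__mutmut_25 := by
  intro output _ hpre
  unfold Spec_x_parse_tofu_version__mutmut_25
  unfold x_parse_tofu_version__mutmut_25 x_parse_tofu_version__mutmut_25_alt
  unfold Pre_x_parse_tofu_version__mutmut_25 at hpre
  have hlam : (fun (info : PySem.Dict String String) (line : String) =>
      let line := PySem.Str.strip line
      if PySem.Str.startswith line "OpenTofu v" then
        info.insert "VERSION" (PySem.Str.replace line "OpenTofu v" "")
      else if PySem.Str.startswith line "on " then
        info.insert "platform" (PySem.Str.strip (PySem.Str.replace line "on " ""))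
      else info) = (fun d l => pvStep d (PySem.Str.strip l)) := rfl
  rw [hlam]
  have hfold : ∀ (init : PySem.Dict String String) (l : List String),
      List.foldl (fun d l => pvStep d (PySem.Str.strip l)) init l
        = pvShape (l.map PySem.Str.strip) init := fun init l =>
    ((List.foldl_map (f := PySem.Str.strip) (g := pvStep) (l := l) (init := init)).symm).trans
      (pvFold _ _)
  simp only [hfold]
  set ls := ((PySem.Str.split? output "\n").getD []).map PySem.Str.strip with hls
  have hV : (fun l => PySem.Str.startswith l "OpenTofu v") = pvV := rfl
  have hP : (fun l => PySem.Str.startswith l "on ") = pvP := rfl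
  simp only [hV, hP, pvLast_filter]
  have hpre' : (match ls.findIdx? pvV, ls.findIdx? pvP with
      | some i, some j => decide (i < j)
      | _, _ => true) = true := hpre
  clear hpre
  congr 1
  unfold pvShape
  rcases hV2 : ls.findIdx? pvV with _ | i <;> rcases hP2 : ls.findIdx? pvP with _ | j
  · have h1 : ls.reverse.find? pvV = none := (pvFindIdx_none_iff _ _).mp hV2
    have h2 : ls.reverse.find? pvP = none := (pvFindIdx_none_iff _ _).mp hP2
    simp [h1, h2]
  · have h1 : ls.reverse.find? pvV = none := (pvFindIdx_none_iff _ _).mp hV2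
    rcases pvRevFind_some pvP ls j hP2 with ⟨y, hy⟩
    simp [h1, hy, pvPlat, pvFP]
  · rcases pvRevFind_some pvV ls i hV2 with ⟨x, hx⟩
    have h2 : ls.reverse.find? pvP = none := (pvFindIdx_none_iff _ _).mp hP2
    simp [hx, h2, pvVer, pvFV]
  · rcases pvRevFind_some pvV ls i hV2 with ⟨x, hx⟩
    rcases pvRevFind_some pvP ls j hP2 with ⟨y, hy⟩
    rw [hV2, hP2] at hpre'
    simp only [decide_eq_true_eq] at hpre'
    simp [hx, hy, hpre', pvVer, pvPlat, pvFV, pvFP]
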